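-- pv_equiv track=rewrite | github.com/TheDarkLightX/MPRD | tools/tokenomics/bench_simplex_por_symmetry.py | symmetry_key
-- ===== SOURCE A (Python) =====
-- from typing import Iterable, List, Optional, Sequence, Tuple
--
-- State = Tuple[int, ...]
--
-- def symmetry_key(x: State, caps: State, weights: State) -> Tuple[Tuple[int, ...], ...]:
--     """Deterministic symmetry quotient key: group indices by (cap,weight), sort values within each class."""
--     groups: dict[Tuple[int, int], List[int]] = {}
--     for i in range(len(x)):
--         groups.setdefault((caps[i], weights[i]), []).append(x[i])
--     out: List[Tuple[int, ...]] = []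
--     for key in sorted(groups.keys()):
--         vals = sorted(groups[key])
--         out.append(tuple(vals))
--     return tuple(out)
-- ===== SOURCE B (Python) =====
-- def symmetry_key(x, caps, weights):
--     """Deterministic symmetry quotient key: group indices by (cap,weight), sort values within each class."""
--     out = []  # list of ((cap, weight), values) runs, in key order
--     for c, w, v in sorted(zip(caps, weights, x)):
--         if out and out[-1][0] == (c, w):
--             out[-1][1].append(v)
--         else:
--             out.append(((c, w), [v]))
--     return tuple(tuple(vals) for _, vals in out)
-- ===== Notes on version B (the rewrite author's own statement) =====
-- stated objective: alternative
-- what changed: Drops the dict accumulation entirely: B zips the three lists into triples, sorts them once lexicographically, and merges consecutive equal-(cap,weight) runs in a single linear scan.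
import Mathlib
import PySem

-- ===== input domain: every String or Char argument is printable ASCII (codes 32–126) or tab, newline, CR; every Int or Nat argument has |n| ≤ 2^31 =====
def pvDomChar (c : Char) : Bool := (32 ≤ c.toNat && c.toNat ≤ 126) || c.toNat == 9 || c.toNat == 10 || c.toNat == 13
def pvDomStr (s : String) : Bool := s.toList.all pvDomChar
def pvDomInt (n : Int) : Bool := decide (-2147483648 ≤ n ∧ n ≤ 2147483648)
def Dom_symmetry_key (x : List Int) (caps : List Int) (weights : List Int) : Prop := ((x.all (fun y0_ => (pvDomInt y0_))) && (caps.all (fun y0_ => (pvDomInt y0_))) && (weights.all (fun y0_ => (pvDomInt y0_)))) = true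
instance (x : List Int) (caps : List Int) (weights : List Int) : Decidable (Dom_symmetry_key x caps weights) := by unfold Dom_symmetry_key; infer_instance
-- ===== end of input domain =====

-- B drops A's dict accumulation: one lexicographic sort of the zipped triples, then one linear
-- scan merging consecutive equal-(cap,weight) runs (objective: alternative algorithm, same cost).

-- ===== PORT A =====
-- groups.setdefault((caps[i], weights[i]), []).append(x[i])  is  d[k] = d.get(k, []) + [x[i]] in place = Dict.modify.
-- caps[i]/weights[i]/x[i] via pyGetD (Pre_ keeps the index in range, where Python does not raise).
-- sorted(groups.keys()) sorts int pairs the way Python sorts tuples: lexicographically (key = toLex).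
def symmetry_key (x : List Int) (caps : List Int) (weights : List Int) : List (List Int) :=
  let groups : PySem.Dict (Int × Int) (List Int) :=
    (PySem.List.pyRange 0 (x.length : Int) 1).foldl
      (fun g i =>
        g.modify (PySem.List.pyGetD caps i 0, PySem.List.pyGetD weights i 0) []
          (fun l => l ++ [PySem.List.pyGetD x i 0]))
      PySem.Dict.empty
  (PySem.List.sorted groups.keys (fun k => toLex k) false).foldl
    (fun out key => out ++ [PySem.List.sorted (groups.getD key []) (fun v => v) false]) []

-- ===== PORT B =====
-- the loop body of B: either extend the run at out[-1] (same key) or open a new run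
def pvRunStep (out : List ((Int × Int) × List Int)) (t : Int × Int × Int) :
    List ((Int × Int) × List Int) :=
  match out.getLast? with
  | some last =>
    if last.1 == (t.1, t.2.1) then out.dropLast ++ [(last.1, last.2 ++ [t.2.2])]
    else out ++ [((t.1, t.2.1), [t.2.2])]
  | none => out ++ [((t.1, t.2.1), [t.2.2])]

-- sorted(zip(caps, weights, x)) sorts int triples Python-style: lexicographically (key = nested toLex)
def symmetry_key_alt (x : List Int) (caps : List Int) (weights : List Int) : List (List Int) :=
  let out := (PySem.List.sorted (caps.zip (weights.zip x))
      (fun t => toLex (t.1, toLex (t.2.1, t.2.2))) false).foldl pvRunStep []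
  out.map (fun p => p.2)

-- ===== PRECONDITION & SPEC =====
-- Pre_ excludes exactly the inputs where A raises IndexError: caps or weights shorter than x.
def Pre_symmetry_key (x : List Int) (caps : List Int) (weights : List Int) : Prop :=
  x.length ≤ caps.length ∧ x.length ≤ weights.length
instance (x : List Int) (caps : List Int) (weights : List Int) : Decidable (Pre_symmetry_key x caps weights) := by unfold Pre_symmetry_key; infer_instance
def pvWitness_symmetry_key : List Int × List Int × List Int := ([3, 1, 2], [1, 1, 2], [5, 5, 7])

def Spec_symmetry_key (x : List Int) (caps : List Int) (weights : List Int) (out : List (List Int)) : Prop := out = symmetry_key_alt x caps weights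
instance (x : List Int) (caps : List Int) (weights : List Int) (out : List (List Int)) : Decidable (Spec_symmetry_key x caps weights out) := by unfold Spec_symmetry_key; infer_instance

-- ===== CLAIM (what is proved, stated in full; the proofs are below) =====
def Claim_equal_symmetry_key : Prop := ∀ (x : List Int) (caps : List Int) (weights : List Int), Dom_symmetry_key x caps weights → Pre_symmetry_key x caps weights → Spec_symmetry_key x caps weights (symmetry_key x caps weights)

-- ===== LEMMAS AND PROOFS =====

-- abbreviations used only by the proofs
def pvKey (t : Int × Int × Int) : Int × Int := (t.1, t.2.1)
def pvLex (t : Int × Int × Int) : Lex (Int × Lex (Int × Int)) := toLex (t.1, toLex (t.2.1, t.2.2))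
def pvVals (T : List (Int × Int × Int)) (k : Int × Int) : List Int :=
  (T.filter (fun t => pvKey t == k)).map (fun t => t.2.2)
def pvSVals (T : List (Int × Int × Int)) (k : Int × Int) : List Int :=
  PySem.List.sorted (pvVals T k) (fun v => v) false
def pvBlock (T : List (Int × Int × Int)) (k : Int × Int) : List (Int × Int × Int) :=
  (pvSVals T k).map (fun v => (k.1, k.2, v))
def pvSK (T : List (Int × Int × Int)) : List (Int × Int) :=
  PySem.List.sorted (PySem.Set.ofList (T.map pvKey)) (fun k => toLex k) false

-- Under Pre_, the zip of the three lists is exactly the indexed reads A performs.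
theorem pv_triples_eq (x caps weights : List Int)
    (h1 : x.length ≤ caps.length) (h2 : x.length ≤ weights.length) :
    caps.zip (weights.zip x) =
      (PySem.List.pyRange 0 (x.length : Int) 1).map
        (fun i => (PySem.List.pyGetD caps i 0,
                   PySem.List.pyGetD weights i 0,
                   PySem.List.pyGetD x i 0)) := by
  rw [PySem.List.pyRange_zero_natCast, List.map_map]
  apply List.ext_getElem
  · simp only [List.length_zip, List.length_map, List.length_range]
    omega
  · intro i hi1 hi2
    simp only [List.length_zip] at hi1
    have hx : i < x.length := by omega
    have hc : i < caps.length := by omega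
    have hw : i < weights.length := by omega
    simp [List.getElem_zip, Function.comp, PySem.List.pyGetD_natCast,
      List.getD_eq_getElem?_getD, hx, hc, hw]

-- A's whole computation, expressed over the triple list it folds: the sorted distinct
-- (cap, weight) keys, each mapped to that class's sorted values.
theorem pv_A_char (T : List (Int × Int × Int)) :
    (PySem.List.sorted
        (T.foldl (fun g t => g.modify (t.1, t.2.1) [] (fun l => l ++ [t.2.2])) PySem.Dict.empty).keys
        (fun k => toLex k) false).foldl
      (fun out key => out ++ [PySem.List.sorted
        ((T.foldl (fun g t => g.modify (t.1, t.2.1) [] (fun l => l ++ [t.2.2])) PySem.Dict.empty).getD key [])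
        (fun v => v) false]) []
    = (pvSK T).map (pvSVals T) := by
  set D := T.foldl (fun g t => g.modify (t.1, t.2.1) [] (fun l => l ++ [t.2.2])) PySem.Dict.empty with hD
  have hDP : D = (T.map (fun t => ((t.1, t.2.1), t.2.2))).foldl
      (fun d p => d.modify p.1 [] (fun l => l ++ [p.2])) PySem.Dict.empty := by
    rw [List.foldl_map]
  have hkeys : D.keys = PySem.Set.ofList (T.map pvKey) := by
    rw [hD]
    have := PySem.Dict.keys_foldl_modify_key T (fun t => (t.1, t.2.1)) []
      (fun _ t => (fun l => l ++ [t.2.2])) (PySem.Dict.empty (κ := Int × Int) (ν := List Int))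
    simp only at this
    rw [this, PySem.Dict.keys_empty, PySem.Set.ofList_eq_foldl]
    rfl
  have hval : ∀ k : Int × Int, D.getD k [] = pvVals T k := by
    intro k
    rw [hDP, PySem.Dict.getD_foldl_modify_append, PySem.Dict.getD_empty,
      List.filter_map, List.map_map]
    simp [pvVals, pvKey, Function.comp_def]
  rw [hkeys, PySem.List.foldl_append_singleton_eq_map, List.nil_append]
  exact List.map_congr_left (fun k _ => by rw [hval k]; rfl)

-- the lexicographic key is injective
theorem pv_lex_inj : Function.Injective pvLex := by
  intro a b h
  unfold pvLex at h
  have h1 := toLex.injective h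
  have hf := congrArg Prod.fst h1
  have hs := toLex.injective (congrArg Prod.snd h1)
  obtain ⟨a1, a2, a3⟩ := a
  obtain ⟨b1, b2, b3⟩ := b
  simp_all [Prod.ext_iff]

-- concatenating, over a complete duplicate-free key list, the sub-lists with each key is a permutation
theorem pv_perm_filter (K : List (Int × Int)) (T : List (Int × Int × Int))
    (hnd : K.Nodup) (hcov : ∀ t ∈ T, pvKey t ∈ K) :
    ((K.map (fun k => T.filter (fun t => pvKey t == k))).flatten).Perm T := by
  induction K generalizing T with
  | nil =>
    cases T with
    | nil => simp
    | cons t ts => exact absurd (hcov t (by simp)) (by simp)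
  | cons k K ih =>
    simp only [List.map_cons, List.flatten_cons]
    have hkK : k ∉ K := (List.nodup_cons.mp hnd).1
    have hsub : ∀ k' ∈ K, T.filter (fun t => pvKey t == k')
        = (T.filter (fun t => !(pvKey t == k))).filter (fun t => pvKey t == k') := by
      intro k' hk'
      rw [List.filter_filter]
      apply List.filter_congr
      intro t _
      have hkk : k' ≠ k := fun h => hkK (h ▸ hk')
      cases hpt : (pvKey t == k') with
      | false => simp
      | true =>
        have : pvKey t = k' := by simpa using hpt
        simp [this, hkk]
    rw [List.map_congr_left hsub]
    have hperm := ih (T.filter (fun t => !(pvKey t == k))) (List.nodup_cons.mp hnd).2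
      (by
        intro t ht
        have h1 := List.mem_filter.mp ht
        have h2 := hcov t h1.1
        have h3 : pvKey t ≠ k := by simpa using h1.2
        simpa [h3] using h2)
    exact (hperm.append_left (T.filter (fun t => pvKey t == k))).trans
      (List.filter_append_perm _ T)

theorem pv_block_perm (T : List (Int × Int × Int)) (k : Int × Int) :
    (pvBlock T k).Perm (T.filter (fun t => pvKey t == k)) := by
  have hmap : (pvVals T k).map (fun v => (k.1, k.2, v)) = T.filter (fun t => pvKey t == k) := by
    unfold pvVals
    rw [List.map_map]
    have h : ∀ t ∈ T.filter (fun t => pvKey t == k),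
        ((fun v => (k.1, k.2, v)) ∘ fun t => t.2.2) t = t := by
      intro t ht
      have hk : pvKey t = k := by simpa using (List.mem_filter.mp ht).2
      subst hk; rfl
    rw [List.map_congr_left h]; simp
  unfold pvBlock pvSVals
  exact hmap ▸ ((PySem.List.sorted_perm (pvVals T k) (fun v => v) false).map (fun v => (k.1, k.2, v)))

theorem pv_SK_nodup (T : List (Int × Int × Int)) : (pvSK T).Nodup := by
  exact ((PySem.List.sorted_perm _ _ _).nodup_iff).mpr (PySem.Set.nodup_ofList _)

-- B's single lexicographic sort equals the concatenation of A's per-key sorted blocks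
theorem pv_sorted_blocks (T : List (Int × Int × Int)) :
    PySem.List.sorted T pvLex false = ((pvSK T).map (pvBlock T)).flatten := by
  have hcov : ∀ t ∈ T, pvKey t ∈ pvSK T := by
    intro t ht
    refine ((PySem.List.sorted_perm _ _ _).mem_iff).mpr ?_
    refine (PySem.Set.mem_ofList _ _).mpr ?_
    exact List.mem_map_of_mem ht
  have hflat : (((pvSK T).map (pvBlock T)).flatten).Perm T := by
    have hf2 : List.Forall₂ List.Perm ((pvSK T).map (pvBlock T))
        ((pvSK T).map (fun k => T.filter (fun t => pvKey t == k))) := by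
      rw [List.forall₂_map_left_iff, List.forall₂_map_right_iff]
      exact List.forall₂_same.mpr (fun k _ => pv_block_perm T k)
    exact (List.Perm.flatten_congr hf2).trans (pv_perm_filter (pvSK T) T (pv_SK_nodup T) hcov)
  apply PySem.List.eq_of_perm_of_pairwise_le_of_injective pvLex pv_lex_inj
  · exact (PySem.List.sorted_perm T pvLex false).trans hflat.symm
  · exact PySem.List.sorted_pairwise T pvLex
  · refine List.pairwise_flatten.mpr ⟨?_, ?_⟩
    · intro l hl
      obtain ⟨k, _, rfl⟩ := List.mem_map.mp hl
      unfold pvBlock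
      rw [List.pairwise_map]
      refine (PySem.List.sorted_pairwise (pvVals T k) (fun v => v)).imp ?_
      intro a b hab
      unfold pvLex
      simp [Prod.Lex.le_iff, hab]
    · rw [List.pairwise_map]
      have hle := PySem.List.sorted_pairwise (PySem.Set.ofList (T.map pvKey)) (fun k => toLex k)
      have hne : List.Pairwise (fun a b : Int × Int => a ≠ b) (pvSK T) :=
        List.nodup_iff_pairwise_ne.mp (pv_SK_nodup T)
      have hlt : List.Pairwise (fun a b : Int × Int => toLex a < toLex b) (pvSK T) := by
        refine (List.Pairwise.and hle hne).imp ?_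
        rintro a b ⟨h1, h2⟩
        exact lt_of_le_of_ne h1 (fun h => h2 (toLex.injective h))
      refine hlt.imp ?_
      intro k k' hkk x hx y hy
      obtain ⟨a, _, rfl⟩ := List.mem_map.mp hx
      obtain ⟨b, _, rfl⟩ := List.mem_map.mp hy
      unfold pvLex
      rw [Prod.Lex.lt_iff] at hkk
      simp only [ofLex_toLex] at hkk
      simp only [Prod.Lex.le_iff, ofLex_toLex]
      rcases hkk with h | ⟨h1, h2⟩
      · exact Or.inl h
      · exact Or.inr ⟨h1, Or.inl h2⟩

-- scanning one run whose key matches the tail of the accumulator extends that run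
theorem pv_run_cont (k : Int × Int) (vs : List Int) (acc : List ((Int × Int) × List Int))
    (u : List Int) :
    (vs.map (fun v => (k.1, k.2, v))).foldl pvRunStep (acc ++ [(k, u)]) = acc ++ [(k, u ++ vs)] := by
  induction vs generalizing u with
  | nil => simp
  | cons v vs ih =>
    simp only [List.map_cons, List.foldl_cons]
    have hstep : pvRunStep (acc ++ [(k, u)]) (k.1, k.2, v) = acc ++ [(k, u ++ [v])] := by
      simp [pvRunStep]
    rw [hstep, ih (u ++ [v])]
    simp

-- scanning one run whose key differs from the tail of the accumulator appends a new run
theorem pv_run_block (k : Int × Int) (vs : List Int) (acc : List ((Int × Int) × List Int))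
    (hvs : vs ≠ []) (hacc : ∀ last, acc.getLast? = some last → last.1 ≠ k) :
    (vs.map (fun v => (k.1, k.2, v))).foldl pvRunStep acc = acc ++ [(k, vs)] := by
  cases vs with
  | nil => exact absurd rfl hvs
  | cons v vs =>
    simp only [List.map_cons, List.foldl_cons]
    have hstep : pvRunStep acc (k.1, k.2, v) = acc ++ [(k, [v])] := by
      unfold pvRunStep
      cases hl : acc.getLast? with
      | none => rfl
      | some last =>
        have hne := hacc last hl
        simp only
        rw [if_neg]
        simp only [beq_iff_eq]
        exact hne
    rw [hstep, pv_run_cont]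
    simp

-- scanning the concatenation of runs with distinct keys recovers the runs
theorem pv_runs (V : (Int × Int) → List Int) :
    ∀ (K : List (Int × Int)) (acc : List ((Int × Int) × List Int)), K.Nodup →
    (∀ k ∈ K, V k ≠ []) →
    (∀ last, acc.getLast? = some last → last.1 ∉ K) →
    ((K.map (fun k => (V k).map (fun v => (k.1, k.2, v)))).flatten).foldl pvRunStep acc
      = acc ++ K.map (fun k => (k, V k)) := by
  intro K
  induction K with
  | nil => simp
  | cons k K ih =>
    intro acc hnd hV hacc
    simp only [List.map_cons, List.flatten_cons, List.foldl_append]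
    rw [pv_run_block k (V k) acc (hV k (by simp)) (fun last hl h => hacc last hl (h ▸ List.mem_cons_self))]
    rw [ih (acc ++ [(k, V k)]) (List.nodup_cons.mp hnd).2 (fun k' hk' => hV k' (by simp [hk']))
      (by
        intro last hl
        rw [List.getLast?_concat] at hl
        cases hl
        exact (List.nodup_cons.mp hnd).1)]
    simp

-- B's scan over the sorted triples produces exactly A's keyed groups
theorem pv_B_char (T : List (Int × Int × Int)) :
    (PySem.List.sorted T pvLex false).foldl pvRunStep []
      = (pvSK T).map (fun k => (k, pvSVals T k)) := by
  rw [pv_sorted_blocks]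
  have hne : ∀ k ∈ pvSK T, pvSVals T k ≠ [] := by
    intro k hk hnil
    have hk2 : k ∈ T.map pvKey := by
      have h1 := ((PySem.List.sorted_perm _ _ _).mem_iff).mp hk
      exact (PySem.Set.mem_ofList _ _).mp h1
    obtain ⟨t, ht, hkt⟩ := List.mem_map.mp hk2
    unfold pvSVals at hnil
    rw [PySem.List.sorted_eq_nil_iff] at hnil
    unfold pvVals at hnil
    rw [List.map_eq_nil_iff, List.filter_eq_nil_iff] at hnil
    exact hnil t ht (by simp [hkt])
  have hr := pv_runs (pvSVals T) (pvSK T) [] (pv_SK_nodup T) hne (by intro last hl; simp at hl)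
  simpa [pvBlock] using hr

theorem symmetry_key_eq_alt (x caps weights : List Int)
    (h : Pre_symmetry_key x caps weights) :
    symmetry_key x caps weights = symmetry_key_alt x caps weights := by
  obtain ⟨h1, h2⟩ := h
  simp only [symmetry_key, symmetry_key_alt]
  rw [show (fun t : Int × Int × Int => toLex (t.1, toLex (t.2.1, t.2.2))) = pvLex from rfl,
    pv_B_char, List.map_map]
  have hdict :
      (PySem.List.pyRange 0 (x.length : Int) 1).foldl
        (fun g i =>
          g.modify (PySem.List.pyGetD caps i 0, PySem.List.pyGetD weights i 0) []
            (fun l => l ++ [PySem.List.pyGetD x i 0]))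
        PySem.Dict.empty
      = ((PySem.List.pyRange 0 (x.length : Int) 1).map
          (fun i => (PySem.List.pyGetD caps i 0, PySem.List.pyGetD weights i 0,
                     PySem.List.pyGetD x i 0))).foldl
          (fun g t => g.modify (t.1, t.2.1) [] (fun l => l ++ [t.2.2])) PySem.Dict.empty := by
    rw [List.foldl_map]
  rw [hdict, ← pv_triples_eq x caps weights h1 h2, pv_A_char]
  rfl

-- ===== VERDICT (by name: the statement is the Claim_ definition above) =====
theorem symmetry_key_spec : Claim_equal_symmetry_key := by
  intro x caps weights _ hpre
  unfold Spec_symmetry_key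
  exact symmetry_key_eq_alt x caps weights hpre
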